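-- pv_equiv track=rewrite | github.com/MiguelVenturo/ANA_ALGM_T3 | Laberinto.py | backtrack
-- ===== SOURCE A (Python) =====
-- laberinto = [
--     ['F', 1, 1, 3, 0, 1, 1, 1, 4],
--     [3, 0, 0, 1, 0, 1, 0, 0, 1],
--     [1, 0, 1, 1, 1, 0, 1, 1, 1],
--     [0, 1, 0, 0, 1, 0, 0, 1, 0],
--     [1, 1, 1, 1, 1, 3, 1, 1, 1],
--     [3, 0, 0, 1, 0, 1, 0, 0, 1],
--     [1, 1, 1, 1, 1, 3, 1, 1, 1],
--     [1, 0, 1, 0, 1, 0, 1, 0, 4],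
--     [1, 3, 1, 0, 1, 1, 1, 1, 'I']
-- ]
--
-- def valor_celda(x):
--     if x in ['F', 'I', 1]:
--         return 1
--     if x == 3 or x == 4:
--         return x
--     return 0
--
-- def backtrack(x, y, suma, visitados, path):
--     if laberinto[x][y] == 'F':
--         if suma >= 23:
--             path.append((x, y))
--             return True
--         return False
--     visitados[x][y] = True
--     path.append((x, y))
--     for dx, dy in [(-1,0),(0,1),(1,0),(0,-1)]:
--         nx, ny = x+dx, y+dy
--         if 0<=nx<9 and 0<=ny<9 and laberinto[nx][ny]!=0 and not visitados[nx][ny]: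
--             val = valor_celda(laberinto[nx][ny])
--             if backtrack(nx, ny, suma+val, visitados, path):
--                 return True
--     visitados[x][y] = False
--     path.pop()
--     return False
-- ===== SOURCE B (Python) =====
-- # Iterative DFS with an explicit stack of (x, y, suma, phase) frames instead of recursion;
-- # mutates visitados/path at the same moments as the recursive original.
-- laberinto = [
--     ['F', 1, 1, 3, 0, 1, 1, 1, 4],
--     [3, 0, 0, 1, 0, 1, 0, 0, 1],
--     [1, 0, 1, 1, 1, 0, 1, 1, 1],
--     [0, 1, 0, 0, 1, 0, 0, 1, 0],
--     [1, 1, 1, 1, 1, 3, 1, 1, 1],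
--     [3, 0, 0, 1, 0, 1, 0, 0, 1],
--     [1, 1, 1, 1, 1, 3, 1, 1, 1],
--     [1, 0, 1, 0, 1, 0, 1, 0, 4],
--     [1, 3, 1, 0, 1, 1, 1, 1, 'I']
-- ]
--
-- def valor_celda(x):
--     if x in ['F', 'I', 1]:
--         return 1
--     if x == 3 or x == 4:
--         return x
--     return 0
--
-- def backtrack(x, y, suma, visitados, path):
--     # frame = (cx, cy, cs, i): i == 0 entry phase, i in 1..4 tries direction i-1, i == 5 unwind
--     stack = [(x, y, suma, 0)]
--     while stack:
--         cx, cy, cs, i = stack[-1]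
--         if i == 0:
--             if laberinto[cx][cy] == 'F':
--                 if cs >= 23:
--                     path.append((cx, cy))
--                     return True
--                 stack.pop()
--                 continue
--             visitados[cx][cy] = True
--             path.append((cx, cy))
--             stack[-1] = (cx, cy, cs, 1)
--             continue
--         if i <= 4:
--             dx, dy = [(-1, 0), (0, 1), (1, 0), (0, -1)][i - 1]
--             stack[-1] = (cx, cy, cs, i + 1)
--             nx, ny = cx + dx, cy + dy
--             if 0 <= nx < 9 and 0 <= ny < 9 and laberinto[nx][ny] != 0 and not visitados[nx][ny]:
--                 stack.append((nx, ny, cs + valor_celda(laberinto[nx][ny]), 0))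
--             continue
--         visitados[cx][cy] = False
--         path.pop()
--         stack.pop()
--     return False
-- ===== Notes on version B (the rewrite author's own statement) =====
-- stated objective: alternative
-- what changed: The recursive backtracking DFS is rewritten as an iterative DFS driven by an explicit stack of (x, y, suma, phase) frames (phase 0 = entry, 1-4 = try direction phase-1, 5 = unwind), with no recursion; the Lean file proves the two ports equal on every input, Pre_ only marks where Python A is known to return instead of raising IndexError.
-- outside the precondition, e.g. on backtrack(1, -1, 1801, [[False], [False, False]], []): A returns True, B returns True
import Mathlib
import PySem

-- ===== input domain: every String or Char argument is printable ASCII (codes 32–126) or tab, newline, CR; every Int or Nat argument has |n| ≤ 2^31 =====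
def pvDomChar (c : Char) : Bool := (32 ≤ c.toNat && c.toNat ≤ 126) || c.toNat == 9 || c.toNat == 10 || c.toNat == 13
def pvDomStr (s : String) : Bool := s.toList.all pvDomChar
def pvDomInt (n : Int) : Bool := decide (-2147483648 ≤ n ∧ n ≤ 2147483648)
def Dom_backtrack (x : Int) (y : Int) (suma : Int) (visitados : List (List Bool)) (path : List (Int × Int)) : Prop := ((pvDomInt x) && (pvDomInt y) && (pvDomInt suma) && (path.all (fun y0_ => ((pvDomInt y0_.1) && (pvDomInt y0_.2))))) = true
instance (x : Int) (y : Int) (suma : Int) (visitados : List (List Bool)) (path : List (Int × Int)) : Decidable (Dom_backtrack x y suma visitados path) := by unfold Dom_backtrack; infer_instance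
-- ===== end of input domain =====

-- B rewrites the recursive backtracking DFS as an iterative DFS over an explicit stack of
-- (x, y, suma, phase) frames (objective: alternative decomposition, not faster).
-- Python A and B mutate `visitados`/`path` identically; the ports model that state
-- functionally (an IndexError run is modelled as `none`) and the equivalence proved here
-- is about the RETURN value.

-- ===== PORT A =====
-- A maze cell is 'F', 'I' or an integer.
inductive Cell
  | F
  | I
  | num : Int → Cell
deriving DecidableEq, Repr

-- the module constant `laberinto`
def maze : List (List Cell) := [
  [.F, .num 1, .num 1, .num 3, .num 0, .num 1, .num 1, .num 1, .num 4],
  [.num 3, .num 0, .num 0, .num 1, .num 0, .num 1, .num 0, .num 0, .num 1],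
  [.num 1, .num 0, .num 1, .num 1, .num 1, .num 0, .num 1, .num 1, .num 1],
  [.num 0, .num 1, .num 0, .num 0, .num 1, .num 0, .num 0, .num 1, .num 0],
  [.num 1, .num 1, .num 1, .num 1, .num 1, .num 3, .num 1, .num 1, .num 1],
  [.num 3, .num 0, .num 0, .num 1, .num 0, .num 1, .num 0, .num 0, .num 1],
  [.num 1, .num 1, .num 1, .num 1, .num 1, .num 3, .num 1, .num 1, .num 1],
  [.num 1, .num 0, .num 1, .num 0, .num 1, .num 0, .num 1, .num 0, .num 4],
  [.num 1, .num 3, .num 1, .num 0, .num 1, .num 1, .num 1, .num 1, .I]]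

-- valor_celda
def valorCelda (c : Cell) : Int :=
  if c = Cell.F ∨ c = Cell.I ∨ c = Cell.num 1 then 1
  else if c = Cell.num 3 then 3
  else if c = Cell.num 4 then 4
  else 0

-- laberinto[x][y]  (Python indexing: negative wraparound, IndexError = none)
def getCell? (x y : Int) : Option Cell :=
  (PySem.List.pyGet? maze x).bind (fun r => PySem.List.pyGet? r y)

-- visitados[x][y]  (read)
def getVis? (v : List (List Bool)) (x y : Int) : Option Bool :=
  (PySem.List.pyGet? v x).bind (fun r => PySem.List.pyGet? r y)

-- visitados[x][y] = b  (Python mutates row x in place; functionally: replace row x)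
def setVis? (v : List (List Bool)) (x y : Int) (b : Bool) : Option (List (List Bool)) :=
  (PySem.List.pyGet? v x).bind (fun row =>
    (PySem.List.pySet? row y b).bind (fun row' => PySem.List.pySet? v x row'))

-- the direction list [(-1,0),(0,1),(1,0),(0,-1)]
def dirs : List (Int × Int) := [(-1, 0), (0, 1), (1, 0), (0, -1)]

-- A's recursion, step for step; `none` = the Python run raises IndexError.  `fuel` only
-- makes the recursion total (the unvisited-cell measure keeps it from ever binding).
-- goA = the function body, loopA = the for-loop over dirs.
mutual
def goA (fuel : Nat) (x y s : Int) (v : List (List Bool)) (p : List (Int × Int)) :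
    Option (Bool × List (List Bool) × List (Int × Int)) :=
  match fuel with
  | 0 => none
  | f + 1 =>
    match getCell? x y with
    | none => none
    | some c =>
      if c = Cell.F then
        if 23 ≤ s then some (true, v, p ++ [(x, y)]) else some (false, v, p)
      else
        match setVis? v x y true with
        | none => none
        | some v1 => loopA f x y s v1 (p ++ [(x, y)]) dirs
  termination_by 6 * fuel
  decreasing_by all_goals (simp [dirs]; omega)

def loopA (fuel : Nat) (x y s : Int) (v : List (List Bool)) (p : List (Int × Int))
    (ds : List (Int × Int)) : Option (Bool × List (List Bool) × List (Int × Int)) :=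
  match ds with
  | [] =>
    match setVis? v x y false with
    | none => none
    | some v' => some (false, v', p.dropLast)
  | (dx, dy) :: rest =>
    let nx := x + dx
    let ny := y + dy
    if 0 ≤ nx ∧ nx < 9 ∧ 0 ≤ ny ∧ ny < 9 then
      match getCell? nx ny with
      | none => none
      | some c =>
        if c ≠ Cell.num 0 then
          match getVis? v nx ny with
          | none => none
          | some b0 =>
            if b0 = false then
              match goA fuel nx ny (s + valorCelda c) v p with
              | none => none
              | some (true, v', p') => some (true, v', p')
              | some (false, v', p') => loopA fuel x y s v' p' rest
            else loopA fuel x y s v p rest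
        else loopA fuel x y s v p rest
    else loopA fuel x y s v p rest
  termination_by 6 * fuel + ds.length + 1
  decreasing_by all_goals simp
end

def gridSize (v : List (List Bool)) : Nat := (v.map List.length).sum

def backtrack (x : Int) (y : Int) (suma : Int) (visitados : List (List Bool)) (path : List (Int × Int)) : Bool :=
  ((goA (gridSize visitados + 2) x y suma visitados path).getD (false, visitados, path)).1

-- ===== PORT B =====
-- Source B's while-loop over the explicit stack; one loop iteration per fuel unit
-- (`none` = IndexError, as for A; the fuel never binds, proved below).
def runB (fuel : Nat) (stack : List (Int × Int × Int × Nat)) (v : List (List Bool))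
    (p : List (Int × Int)) : Option (Bool × List (List Bool) × List (Int × Int)) :=
  match fuel with
  | 0 => none
  | f + 1 =>
    match stack with
    | [] => some (false, v, p)
    | (cx, cy, cs, i) :: rest =>
      if i = 0 then
        match getCell? cx cy with
        | none => none
        | some c =>
          if c = Cell.F then
            if 23 ≤ cs then some (true, v, p ++ [(cx, cy)])
            else runB f rest v p
          else
            match setVis? v cx cy true with
            | none => none
            | some v1 => runB f ((cx, cy, cs, 1) :: rest) v1 (p ++ [(cx, cy)])
      else if i ≤ 4 then
        let d := dirs.getD (i - 1) (0, 0)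
        let nx := cx + d.1
        let ny := cy + d.2
        if 0 ≤ nx ∧ nx < 9 ∧ 0 ≤ ny ∧ ny < 9 then
          match getCell? nx ny with
          | none => none
          | some c =>
            if c ≠ Cell.num 0 then
              match getVis? v nx ny with
              | none => none
              | some b0 =>
                if b0 = false then
                  runB f ((nx, ny, cs + valorCelda c, 0) :: (cx, cy, cs, i + 1) :: rest) v p
                else runB f ((cx, cy, cs, i + 1) :: rest) v p
            else runB f ((cx, cy, cs, i + 1) :: rest) v p
        else runB f ((cx, cy, cs, i + 1) :: rest) v p
      else
        match setVis? v cx cy false with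
        | none => none
        | some v' => runB f rest v' p.dropLast

def backtrack_alt (x : Int) (y : Int) (suma : Int) (visitados : List (List Bool)) (path : List (Int × Int)) : Bool :=
  ((runB (4 ^ (gridSize visitados + 4)) [(x, y, suma, 0)] visitados path).getD
    (false, visitados, path)).1

-- ===== PRECONDITION & SPEC =====
-- helpers for Pre_: the region of the fixed 9×9 maze the search could ever touch,
-- computed from the INPUT's shape (grid bounds and initial marks) over the constant maze
def mazeAt (n : Int × Int) : Cell := (maze.getD n.1.toNat []).getD n.2.toNat (Cell.num 0)
def inMaze (n : Int × Int) : Bool := decide (0 ≤ n.1 ∧ n.1 < 9 ∧ 0 ≤ n.2 ∧ n.2 < 9)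
-- visitados[n] is readable (n is a non-negative in-grid pair)
def readOK (w : List (List Bool)) (n : Int × Int) : Bool :=
  decide (n.1.toNat < w.length) && decide (n.2.toNat < (w.getD n.1.toNat []).length)
def markAt (w : List (List Bool)) (n : Int × Int) : Bool :=
  (w.getD n.1.toNat []).getD n.2.toNat false
def neigh (c : Int × Int) : List (Int × Int) := dirs.map (fun d => (c.1 + d.1, c.2 + d.2))
-- one expansion step of the nonzero-adjacency closure (w = grid after the start mark)
def closStep (w : List (List Bool)) (E : List (Int × Int)) : List (Int × Int) :=
  (E.flatMap neigh).foldl (fun acc n =>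
    if inMaze n && !decide (mazeAt n = Cell.num 0) && readOK w n && !markAt w n &&
        !decide (mazeAt n = Cell.F) && !acc.contains n
    then acc ++ [n] else acc) E
def reachClos (w : List (List Bool)) (E : List (Int × Int)) : List (Int × Int) :=
  (closStep w)^[82] E
def pvPreCheck (x y : Int) (vis : List (List Bool)) : Bool :=
  decide (-9 ≤ x ∧ x < 9 ∧ -9 ≤ y ∧ y < 9) &&
  (match getCell? x y with
   | none => false
   | some c =>
     if c = Cell.F then true
     else
       match setVis? vis x y true with
       | none => false
       | some w =>
         (reachClos w [(x, y)]).all (fun cpos => (neigh cpos).all (fun n =>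
           !(inMaze n && !decide (mazeAt n = Cell.num 0)) || readOK w n)))

-- Pre_ = the inputs on which Python A is known to RETURN rather than raise IndexError:
-- start coordinates that index the fixed 9×9 maze, and a `visitados` grid whose bounds
-- contain every cell the search could ever touch (the nonzero-adjacency reachability set
-- of the start over the CONSTANT maze, cut by the grid's initial True marks — a property
-- of the input's shape, not a run of A).  A's exact crash set has no closed form: a run
-- can find a sum≥23 path and return True just before the access that would have raised,
-- so Pre_ necessarily also excludes that thin margin of early-success inputs.  The
-- exclusion hides nothing: `ports_agree` below proves A's port equal to B's port on
-- EVERY input (the proof never uses Pre_), and the cite shows one such excluded input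
-- where A and B return the same True.
def Pre_backtrack (x : Int) (y : Int) (suma : Int) (visitados : List (List Bool)) (path : List (Int × Int)) : Prop :=
  pvPreCheck x y visitados = true
instance (x : Int) (y : Int) (suma : Int) (visitados : List (List Bool)) (path : List (Int × Int)) : Decidable (Pre_backtrack x y suma visitados path) := by unfold Pre_backtrack; infer_instance

def pvWitness_backtrack : Int × Int × Int × List (List Bool) × (List (Int × Int)) :=
  (0, 0, 0, [], [])

def Spec_backtrack (x : Int) (y : Int) (suma : Int) (visitados : List (List Bool)) (path : List (Int × Int)) (out : Bool) : Prop := out = backtrack_alt x y suma visitados path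
instance (x : Int) (y : Int) (suma : Int) (visitados : List (List Bool)) (path : List (Int × Int)) (out : Bool) : Decidable (Spec_backtrack x y suma visitados path out) := by unfold Spec_backtrack; infer_instance

-- ===== CLAIM (what is proved, stated in full; the proofs are below) =====
def Claim_equal_backtrack : Prop := ∀ (x : Int) (y : Int) (suma : Int) (visitados : List (List Bool)) (path : List (Int × Int)), Dom_backtrack x y suma visitados path → Pre_backtrack x y suma visitados path → Spec_backtrack x y suma visitados path (backtrack x y suma visitados path)

-- ===== LEMMAS AND PROOFS =====
-- (in fact A's port and B's port agree on EVERY input — both model an IndexError run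
-- as `none`, hence return false — so the proof below never needs Pre_ itself)

-- ---- Python-indexing characterizations ----

theorem pyIdx?_lt {n : Nat} {i : Int} {k : Nat} (h : PySem.List.pyIdx? n i = some k) : k < n := by
  unfold PySem.List.pyIdx? at h
  split_ifs at h <;> simp_all <;> omega

theorem pyGet?_of_idx {α : Type} {xs : List α} {i : Int} {k : Nat}
    (hI : PySem.List.pyIdx? xs.length i = some k) : PySem.List.pyGet? xs i = xs[k]? := by
  unfold PySem.List.pyGet?
  rw [hI]
  rfl

theorem pySet?_of_idx {α : Type} {xs : List α} {i : Int} {k : Nat} (v : α)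
    (hI : PySem.List.pyIdx? xs.length i = some k) :
    PySem.List.pySet? xs i v = some (xs.set k v) := by
  unfold PySem.List.pySet?
  rw [hI]
  rfl

theorem pyGet?_inv {α : Type} {xs : List α} {i : Int} {a : α}
    (h : PySem.List.pyGet? xs i = some a) :
    ∃ k, PySem.List.pyIdx? xs.length i = some k ∧ k < xs.length ∧ xs[k]? = some a := by
  unfold PySem.List.pyGet? at h
  cases hI : PySem.List.pyIdx? xs.length i with
  | none => rw [hI] at h; exact absurd h (by simp)
  | some k =>
    rw [hI] at h
    exact ⟨k, rfl, pyIdx?_lt hI, h⟩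

theorem getVis?_inv {v : List (List Bool)} {x y : Int} {b : Bool}
    (h : getVis? v x y = some b) :
    ∃ i j, PySem.List.pyIdx? v.length x = some i ∧ i < v.length ∧
      PySem.List.pyIdx? (v.getD i []).length y = some j ∧ j < (v.getD i []).length ∧
      b = (v.getD i []).getD j false := by
  unfold getVis? at h
  cases hrow : PySem.List.pyGet? v x with
  | none => rw [hrow] at h; exact absurd h (by simp)
  | some row =>
    rw [hrow] at h
    simp only [Option.bind_some] at h
    obtain ⟨i, hI, hi, hri⟩ := pyGet?_inv hrow
    have hrow' : row = v.getD i [] := by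
      rw [List.getD_eq_getElem v [] hi]
      have := List.getElem?_eq_getElem hi (l := v)
      rw [this] at hri
      simpa [eq_comm] using hri
    subst hrow'
    obtain ⟨j, hJ, hj, hbj⟩ := pyGet?_inv h
    refine ⟨i, j, hI, hi, hJ, hj, ?_⟩
    rw [List.getD_eq_getElem _ false hj]
    have := List.getElem?_eq_getElem hj (l := v.getD i [])
    rw [this] at hbj
    simpa [eq_comm] using hbj

theorem setVis?_of_idx {v : List (List Bool)} {x y : Int} {i j : Nat} (b : Bool)
    (hI : PySem.List.pyIdx? v.length x = some i)
    (hJ : PySem.List.pyIdx? (v.getD i []).length y = some j) :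
    setVis? v x y b = some (v.set i ((v.getD i []).set j b)) := by
  unfold setVis?
  rw [pyGet?_of_idx hI]
  have hi := pyIdx?_lt hI
  rw [List.getElem?_eq_getElem hi]
  simp only [Option.bind_some]
  have hJ' : PySem.List.pyIdx? v[i].length y = some j := by
    rw [← List.getD_eq_getElem v [] hi]; exact hJ
  rw [pySet?_of_idx b hJ']
  simp only [Option.bind_some]
  rw [pySet?_of_idx _ hI]
  rw [List.getD_eq_getElem v [] hi]

theorem setVis?_inv {v w : List (List Bool)} {x y : Int} {b : Bool}
    (h : setVis? v x y b = some w) :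
    ∃ i j, PySem.List.pyIdx? v.length x = some i ∧ i < v.length ∧
      PySem.List.pyIdx? (v.getD i []).length y = some j ∧ j < (v.getD i []).length ∧
      w = v.set i ((v.getD i []).set j b) := by
  unfold setVis? at h
  cases hrow : PySem.List.pyGet? v x with
  | none => rw [hrow] at h; exact absurd h (by simp)
  | some row =>
    rw [hrow] at h
    simp only [Option.bind_some] at h
    obtain ⟨i, hI, hi, hri⟩ := pyGet?_inv hrow
    have hrow' : row = v.getD i [] := by
      rw [List.getD_eq_getElem v [] hi]
      have := List.getElem?_eq_getElem hi (l := v)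
      rw [this] at hri
      simpa [eq_comm] using hri
    subst hrow'
    cases hrs : PySem.List.pySet? (v.getD i []) y b with
    | none => rw [hrs] at h; exact absurd h (by simp)
    | some row' =>
      rw [hrs] at h
      simp only [Option.bind_some] at h
      unfold PySem.List.pySet? at hrs
      cases hJ : PySem.List.pyIdx? (v.getD i []).length y with
      | none => rw [hJ] at hrs; exact absurd hrs (by simp)
      | some j =>
        rw [hJ] at hrs
        simp only [Option.map_some] at hrs
        have hrow'' : row' = (v.getD i []).set j b := by simpa [eq_comm] using hrs
        subst hrow''
        have hw := pySet?_of_idx (xs := v) ((v.getD i []).set j b) hI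
        rw [hw] at h
        refine ⟨i, j, hI, hi, hJ, pyIdx?_lt hJ, by simpa [eq_comm] using h⟩

-- ---- list update helpers ----

theorem set_getD_self {α : Type} (l : List α) (n : Nat) (d : α) (h : l.getD n d = d) :
    l.set n d = l := by
  induction l generalizing n with
  | nil => rfl
  | cons a t ih =>
    cases n with
    | zero => simp [List.getD] at h; simp [h]
    | succ n => simp [List.getD] at h ⊢; exact ih n h

theorem set_getD_id {α : Type} (l : List α) (n : Nat) (d : α) : l.set n (l.getD n d) = l := by
  induction l generalizing n with
  | nil => rfl
  | cons a t ih =>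
    cases n with
    | zero => simp [List.getD]
    | succ n => simp [List.getD]; exact ih n

theorem getD_set_self {α : Type} (l : List α) (n : Nat) (r d : α) (h : n < l.length) :
    (l.set n r).getD n d = r := by
  rw [List.getD_eq_getElem?_getD, List.getElem?_set_self (by simpa using h)]
  rfl

-- ---- counting unvisited cells ----

theorem countFalse_set_true (row : List Bool) (j : Nat) (hj : j < row.length)
    (h : row.getD j false = false) :
    row.countP (fun b => !b) = (row.set j true).countP (fun b => !b) + 1 := by
  induction row generalizing j with
  | nil => simp at hj
  | cons a t ih =>
    cases j with
    | zero =>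
      simp [List.getD] at h
      subst h
      simp
    | succ j =>
      simp [List.getD] at h
      simp only [List.length_cons, Nat.add_lt_add_iff_right] at hj
      simp only [List.set_cons_succ, List.countP_cons]
      rw [ih j hj h]
      omega

def mfalse' (v : List (List Bool)) : Nat := (v.map (fun r => r.countP (fun b => !b))).sum

theorem mfalse'_set (v : List (List Bool)) (i : Nat) (r' : List Bool) (hi : i < v.length) :
    mfalse' (v.set i r') + (v.getD i []).countP (fun b => !b) =
      mfalse' v + r'.countP (fun b => !b) := by
  induction v generalizing i with
  | nil => simp at hi
  | cons a t ih =>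
    cases i with
    | zero => simp [mfalse']; omega
    | succ i =>
      simp only [List.length_cons, Nat.add_lt_add_iff_right] at hi
      simp only [List.set_cons_succ, mfalse', List.map_cons, List.sum_cons, List.getD_cons_succ]
      have := ih i hi
      simp only [mfalse'] at this
      omega

theorem gridSize_set (v : List (List Bool)) (i : Nat) (r' : List Bool)
    (hlen : r'.length = (v.getD i []).length) : gridSize (v.set i r') = gridSize v := by
  induction v generalizing i with
  | nil => rfl
  | cons a t ih =>
    cases i with
    | zero => simp [gridSize] at hlen ⊢; omega
    | succ i =>
      simp only [List.set_cons_succ, gridSize, List.map_cons, List.sum_cons,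
        List.getD_cons_succ] at *
      rw [ih i hlen]

theorem mfalse'_le_gridSize (v : List (List Bool)) : mfalse' v ≤ gridSize v := by
  induction v with
  | nil => simp [mfalse', gridSize]
  | cons a t ih =>
    simp only [mfalse', gridSize, List.map_cons, List.sum_cons] at *
    have := List.countP_le_length (p := fun b => !b) (l := a)
    omega

-- ---- facts about the visitados accesses ----

theorem setVis?_false_self (v : List (List Bool)) (x y : Int)
    (h : getVis? v x y = some false) : setVis? v x y false = some v := by
  obtain ⟨i, j, hI, hi, hJ, hj, hb⟩ := getVis?_inv h
  rw [setVis?_of_idx false hI hJ, set_getD_self _ _ _ hb.symm, set_getD_id]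

theorem setVis?_true_of_get (v : List (List Bool)) (x y : Int) (b : Bool)
    (h : getVis? v x y = some b) : ∃ w, setVis? v x y true = some w := by
  obtain ⟨i, j, hI, hi, hJ, hj, hb⟩ := getVis?_inv h
  exact ⟨_, setVis?_of_idx true hI hJ⟩

theorem mfalse'_setVis?_true (v w : List (List Bool)) (x y : Int)
    (h : getVis? v x y = some false) (hw : setVis? v x y true = some w) :
    mfalse' w + 1 = mfalse' v := by
  obtain ⟨i, j, hI, hi, hJ, hj, hb⟩ := getVis?_inv h
  rw [setVis?_of_idx true hI hJ] at hw
  have hwv : w = v.set i ((v.getD i []).set j true) := by simpa [eq_comm] using hw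
  subst hwv
  have h1 := mfalse'_set v i ((v.getD i []).set j true) hi
  have h2 := countFalse_set_true (v.getD i []) j hj hb.symm
  omega

theorem setVis?_twice (v w : List (List Bool)) (x y : Int) (t t' : Bool)
    (hw : setVis? v x y t = some w) : setVis? w x y t' = setVis? v x y t' := by
  obtain ⟨i, j, hI, hi, hJ, hj, hwv⟩ := setVis?_inv hw
  subst hwv
  have hlen : (v.set i ((v.getD i []).set j t)).length = v.length := by simp
  have hI' : PySem.List.pyIdx? (v.set i ((v.getD i []).set j t)).length x = some i := by
    rw [hlen]; exact hI
  have hrow : (v.set i ((v.getD i []).set j t)).getD i [] = (v.getD i []).set j t :=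
    getD_set_self _ _ _ _ hi
  have hJ' : PySem.List.pyIdx?
      ((v.set i ((v.getD i []).set j t)).getD i []).length y = some j := by
    rw [hrow, List.length_set]; exact hJ
  rw [setVis?_of_idx t' hI' hJ', setVis?_of_idx t' hI hJ, hrow]
  simp only [List.set_set]

theorem gridSize_setVis? (v w : List (List Bool)) (x y : Int) (b : Bool)
    (hw : setVis? v x y b = some w) : gridSize w = gridSize v := by
  obtain ⟨i, j, hI, hi, hJ, hj, hwv⟩ := setVis?_inv hw
  subst hwv
  exact gridSize_set _ _ _ (by simp)

theorem mAfter_le (v : List (List Bool)) (x y : Int) :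
    mfalse' ((setVis? v x y true).getD v) ≤ gridSize v := by
  cases hw : setVis? v x y true with
  | none => simpa using mfalse'_le_gridSize v
  | some w =>
    simp only [Option.getD_some]
    calc mfalse' w ≤ gridSize w := mfalse'_le_gridSize w
      _ = gridSize v := gridSize_setVis? v w x y true hw

-- ---- step equations for the fuelled recursions ----

theorem goA_zero (x y s : Int) (v : List (List Bool)) (p : List (Int × Int)) :
    goA 0 x y s v p = none := by
  rw [goA]

theorem goA_succ (f : Nat) (x y s : Int) (v : List (List Bool)) (p : List (Int × Int)) :
    goA (f + 1) x y s v p =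
      match getCell? x y with
      | none => none
      | some c =>
        if c = Cell.F then
          if 23 ≤ s then some (true, v, p ++ [(x, y)]) else some (false, v, p)
        else
          match setVis? v x y true with
          | none => none
          | some v1 => loopA f x y s v1 (p ++ [(x, y)]) dirs := by
  rw [goA]

theorem loopA_nil (f : Nat) (x y s : Int) (v : List (List Bool)) (p : List (Int × Int)) :
    loopA f x y s v p [] =
      match setVis? v x y false with
      | none => none
      | some v' => some (false, v', p.dropLast) := by
  rw [loopA]

theorem loopA_cons (f : Nat) (x y s : Int) (v : List (List Bool)) (p : List (Int × Int))
    (dx dy : Int) (rest : List (Int × Int)) :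
    loopA f x y s v p ((dx, dy) :: rest) =
      if 0 ≤ x + dx ∧ x + dx < 9 ∧ 0 ≤ y + dy ∧ y + dy < 9 then
        match getCell? (x + dx) (y + dy) with
        | none => none
        | some c =>
          if c ≠ Cell.num 0 then
            match getVis? v (x + dx) (y + dy) with
            | none => none
            | some b0 =>
              if b0 = false then
                match goA f (x + dx) (y + dy) (s + valorCelda c) v p with
                | none => none
                | some (true, v', p') => some (true, v', p')
                | some (false, v', p') => loopA f x y s v' p' rest
              else loopA f x y s v p rest
          else loopA f x y s v p rest
      else loopA f x y s v p rest := by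
  rw [loopA]

theorem runB_zero (st : List (Int × Int × Int × Nat)) (v : List (List Bool)) (p : List (Int × Int)) :
    runB 0 st v p = none := by
  rw [runB]

theorem runB_nil (f : Nat) (v : List (List Bool)) (p : List (Int × Int)) :
    runB (f + 1) [] v p = some (false, v, p) := by
  rw [runB]

theorem runB_succ (f : Nat) (cx cy cs : Int) (i : Nat) (rest : List (Int × Int × Int × Nat))
    (v : List (List Bool)) (p : List (Int × Int)) :
    runB (f + 1) ((cx, cy, cs, i) :: rest) v p =
      if i = 0 then
        match getCell? cx cy with
        | none => none
        | some c =>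
          if c = Cell.F then
            if 23 ≤ cs then some (true, v, p ++ [(cx, cy)])
            else runB f rest v p
          else
            match setVis? v cx cy true with
            | none => none
            | some v1 => runB f ((cx, cy, cs, 1) :: rest) v1 (p ++ [(cx, cy)])
      else if i ≤ 4 then
        if 0 ≤ cx + (dirs.getD (i - 1) (0, 0)).1 ∧ cx + (dirs.getD (i - 1) (0, 0)).1 < 9 ∧
            0 ≤ cy + (dirs.getD (i - 1) (0, 0)).2 ∧ cy + (dirs.getD (i - 1) (0, 0)).2 < 9 then
          match getCell? (cx + (dirs.getD (i - 1) (0, 0)).1) (cy + (dirs.getD (i - 1) (0, 0)).2) with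
          | none => none
          | some c =>
            if c ≠ Cell.num 0 then
              match getVis? v (cx + (dirs.getD (i - 1) (0, 0)).1) (cy + (dirs.getD (i - 1) (0, 0)).2) with
              | none => none
              | some b0 =>
                if b0 = false then
                  runB f ((cx + (dirs.getD (i - 1) (0, 0)).1, cy + (dirs.getD (i - 1) (0, 0)).2,
                    cs + valorCelda c, 0) :: (cx, cy, cs, i + 1) :: rest) v p
                else runB f ((cx, cy, cs, i + 1) :: rest) v p
            else runB f ((cx, cy, cs, i + 1) :: rest) v p
        else runB f ((cx, cy, cs, i + 1) :: rest) v p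
      else
        match setVis? v cx cy false with
        | none => none
        | some v' => runB f rest v' p.dropLast := by
  rw [runB]

-- ---- fuel monotonicity of the B-side loop ----

theorem runB_mono (f : Nat) : ∀ s v p r, runB f s v p = some r → runB (f + 1) s v p = some r := by
  induction f with
  | zero => intro s v p r h; rw [runB_zero] at h; exact absurd h (by simp)
  | succ f ih =>
    intro s v p r h
    match s with
    | [] => rw [runB_nil] at h ⊢; exact h
    | (cx, cy, cs, i) :: rest =>
      rw [runB_succ] at h ⊢
      by_cases h0 : i = 0
      · simp only [if_pos h0] at h ⊢
        cases hc : getCell? cx cy with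
        | none => rw [hc] at h; simp only [] at h; exact absurd h (by simp)
        | some c =>
          rw [hc] at h
          simp only [] at h ⊢
          by_cases hF : c = Cell.F
          · simp only [if_pos hF] at h ⊢
            by_cases hs : 23 ≤ cs
            · simp only [if_pos hs] at h ⊢; exact h
            · simp only [if_neg hs] at h ⊢; exact ih _ _ _ _ h
          · simp only [if_neg hF] at h ⊢
            cases hv : setVis? v cx cy true with
            | none => rw [hv] at h; simp only [] at h; exact absurd h (by simp)
            | some v1 =>
              rw [hv] at h
              simp only [] at h ⊢
              exact ih _ _ _ _ h
      · simp only [if_neg h0] at h ⊢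
        by_cases h4 : i ≤ 4
        · simp only [if_pos h4] at h ⊢
          by_cases hg : 0 ≤ cx + (dirs.getD (i - 1) (0, 0)).1 ∧ cx + (dirs.getD (i - 1) (0, 0)).1 < 9 ∧
              0 ≤ cy + (dirs.getD (i - 1) (0, 0)).2 ∧ cy + (dirs.getD (i - 1) (0, 0)).2 < 9
          · simp only [if_pos hg] at h ⊢
            cases hc : getCell? (cx + (dirs.getD (i - 1) (0, 0)).1) (cy + (dirs.getD (i - 1) (0, 0)).2) with
            | none => rw [hc] at h; simp only [] at h; exact absurd h (by simp)
            | some c =>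
              rw [hc] at h
              simp only [] at h ⊢
              by_cases hz : c ≠ Cell.num 0
              · simp only [if_pos hz] at h ⊢
                cases hv : getVis? v (cx + (dirs.getD (i - 1) (0, 0)).1) (cy + (dirs.getD (i - 1) (0, 0)).2) with
                | none => rw [hv] at h; simp only [] at h; exact absurd h (by simp)
                | some b0 =>
                  rw [hv] at h
                  simp only [] at h ⊢
                  by_cases hb : b0 = false
                  · simp only [if_pos hb] at h ⊢; exact ih _ _ _ _ h
                  · simp only [if_neg hb] at h ⊢; exact ih _ _ _ _ h
              · simp only [if_neg hz] at h ⊢; exact ih _ _ _ _ h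
          · simp only [if_neg hg] at h ⊢; exact ih _ _ _ _ h
        · simp only [if_neg h4] at h ⊢
          cases hv : setVis? v cx cy false with
          | none => rw [hv] at h; simp only [] at h; exact absurd h (by simp)
          | some v' =>
            rw [hv] at h
            simp only [] at h ⊢
            exact ih _ _ _ _ h

theorem runB_mono_le (f g : Nat) (h : f ≤ g) : ∀ s v p r, runB f s v p = some r → runB g s v p = some r := by
  obtain ⟨d, rfl⟩ := Nat.exists_eq_add_of_le h
  induction d with
  | zero => intro s v p r hr; exact hr
  | succ d ih =>
    intro s v p r hr
    rw [show f + (d + 1) = (f + d) + 1 by omega]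
    exact runB_mono _ _ _ _ _ (ih (by omega) s v p r hr)

-- ---- on failure A restores its state exactly ----

def RGStmt (f : Nat) : Prop := ∀ x y s v p v' p',
  goA f x y s v p = some (false, v', p') →
  p' = p ∧ ((getCell? x y = some Cell.F ∧ v' = v) ∨ setVis? v x y false = some v')

theorem restL (f : Nat) (hg : RGStmt f) :
    ∀ ds x y s v p v' p', loopA f x y s v p ds = some (false, v', p') →
      setVis? v x y false = some v' ∧ p' = p.dropLast := by
  intro ds
  induction ds with
  | nil =>
    intro x y s v p v' p' h
    rw [loopA_nil] at h
    cases hv : setVis? v x y false with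
    | none => rw [hv] at h; exact absurd h (by simp)
    | some w =>
      rw [hv] at h
      simp only [Option.some.injEq, Prod.mk.injEq, true_and] at h
      obtain ⟨rfl, rfl⟩ := h
      exact ⟨rfl, rfl⟩
  | cons d rest ih =>
    obtain ⟨dx, dy⟩ := d
    intro x y s v p v' p' h
    rw [loopA_cons] at h
    by_cases hb : 0 ≤ x + dx ∧ x + dx < 9 ∧ 0 ≤ y + dy ∧ y + dy < 9
    · simp only [if_pos hb] at h
      cases hc : getCell? (x + dx) (y + dy) with
      | none => rw [hc] at h; exact absurd h (by simp)
      | some c =>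
        rw [hc] at h
        by_cases hz : c ≠ Cell.num 0
        · simp only [if_pos hz] at h
          cases hv : getVis? v (x + dx) (y + dy) with
          | none => rw [hv] at h; exact absurd h (by simp)
          | some b0 =>
            rw [hv] at h
            by_cases hb0 : b0 = false
            · simp only [if_pos hb0] at h
              cases hch : goA f (x + dx) (y + dy) (s + valorCelda c) v p with
              | none => rw [hch] at h; exact absurd h (by simp)
              | some res =>
                obtain ⟨bc, vc, pc⟩ := res
                rw [hch] at h
                cases bc with
                | true =>
                  have h' : some (true, vc, pc) = some (false, v', p') := h
                  simp at h'
                | false =>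
                  have h' : loopA f x y s vc pc rest = some (false, v', p') := h
                  subst hb0
                  obtain ⟨hpc, hvc⟩ := hg _ _ _ _ _ _ _ hch
                  have hvcv : vc = v := by
                    rcases hvc with ⟨_, rfl⟩ | hset
                    · rfl
                    · rw [setVis?_false_self v _ _ hv] at hset
                      simpa [eq_comm] using hset
                  rw [hvcv, hpc] at h'
                  exact ih _ _ _ _ _ _ _ h'
            · simp only [if_neg hb0] at h
              exact ih _ _ _ _ _ _ _ h
        · simp only [if_neg hz] at h
          exact ih _ _ _ _ _ _ _ h
    · simp only [if_neg hb] at h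
      exact ih _ _ _ _ _ _ _ h

theorem restG : ∀ f, RGStmt f := by
  intro f
  induction f with
  | zero =>
    intro x y s v p v' p' h
    rw [goA_zero] at h
    exact absurd h (by simp)
  | succ f ih =>
    intro x y s v p v' p' h
    rw [goA_succ] at h
    cases hc : getCell? x y with
    | none => rw [hc] at h; exact absurd h (by simp)
    | some c =>
      rw [hc] at h
      by_cases hF : c = Cell.F
      · simp only [if_pos hF] at h
        by_cases hs : 23 ≤ s
        · simp only [if_pos hs] at h
          have h' : some (true, v, p ++ [(x, y)]) = some (false, v', p') := h
          simp at h'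
        · simp only [if_neg hs] at h
          have h' : some (false, v, p) = some (false, v', p') := h
          simp only [Option.some.injEq, Prod.mk.injEq] at h'
          subst hF
          exact ⟨h'.2.2.symm, Or.inl ⟨rfl, h'.2.1.symm⟩⟩
      · simp only [if_neg hF] at h
        cases hv : setVis? v x y true with
        | none => rw [hv] at h; exact absurd h (by simp)
        | some v1 =>
          rw [hv] at h
          obtain ⟨hset, hp⟩ := restL f ih dirs x y s v1 (p ++ [(x, y)]) v' p' h
          refine ⟨by simpa using hp, Or.inr ?_⟩
          rw [← setVis?_twice v v1 x y true false hv]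
          exact hset

-- ---- B-side single-step branch lemmas ----

theorem runB_entry_cell_none (G : Nat) (x y s : Int) (rest : List (Int × Int × Int × Nat))
    (v : List (List Bool)) (p : List (Int × Int)) (hc : getCell? x y = none) :
    runB (G + 1) ((x, y, s, 0) :: rest) v p = none := by
  rw [runB_succ, if_pos rfl, hc]

theorem runB_entry_F (G : Nat) (x y s : Int) (rest : List (Int × Int × Int × Nat))
    (v : List (List Bool)) (p : List (Int × Int)) (hc : getCell? x y = some Cell.F) :
    runB (G + 1) ((x, y, s, 0) :: rest) v p =
      if 23 ≤ s then some (true, v, p ++ [(x, y)]) else runB G rest v p := by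
  rw [runB_succ, if_pos rfl, hc]
  simp

theorem runB_entry_enter (G : Nat) (x y s : Int) (rest : List (Int × Int × Int × Nat))
    (v v1 : List (List Bool)) (p : List (Int × Int)) (c : Cell)
    (hc : getCell? x y = some c) (hF : ¬ c = Cell.F) (hv : setVis? v x y true = some v1) :
    runB (G + 1) ((x, y, s, 0) :: rest) v p = runB G ((x, y, s, 1) :: rest) v1 (p ++ [(x, y)]) := by
  rw [runB_succ, if_pos rfl, hc]
  simp only []
  rw [if_neg hF, hv]

theorem runB_entry_set_none (G : Nat) (x y s : Int) (rest : List (Int × Int × Int × Nat))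
    (v : List (List Bool)) (p : List (Int × Int)) (c : Cell)
    (hc : getCell? x y = some c) (hF : ¬ c = Cell.F) (hv : setVis? v x y true = none) :
    runB (G + 1) ((x, y, s, 0) :: rest) v p = none := by
  rw [runB_succ, if_pos rfl, hc]
  simp only []
  rw [if_neg hF, hv]

theorem runB_dir_bounds_out (G : Nat) (x y s : Int) (k : Nat) (hk : k ≤ 3)
    (rest : List (Int × Int × Int × Nat)) (v : List (List Bool)) (p : List (Int × Int))
    (dx dy : Int) (hdd : dirs.getD k (0, 0) = (dx, dy))
    (hg : ¬(0 ≤ x + dx ∧ x + dx < 9 ∧ 0 ≤ y + dy ∧ y + dy < 9)) :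
    runB (G + 1) ((x, y, s, k + 1) :: rest) v p = runB G ((x, y, s, k + 1 + 1) :: rest) v p := by
  rw [runB_succ, if_neg (by omega : ¬(k + 1 = 0)), if_pos (by omega : k + 1 ≤ 4)]
  simp only [Nat.add_sub_cancel, hdd]
  rw [if_neg hg]

theorem runB_dir_cell_none (G : Nat) (x y s : Int) (k : Nat) (hk : k ≤ 3)
    (rest : List (Int × Int × Int × Nat)) (v : List (List Bool)) (p : List (Int × Int))
    (dx dy : Int) (hdd : dirs.getD k (0, 0) = (dx, dy))
    (hg : 0 ≤ x + dx ∧ x + dx < 9 ∧ 0 ≤ y + dy ∧ y + dy < 9)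
    (hc : getCell? (x + dx) (y + dy) = none) :
    runB (G + 1) ((x, y, s, k + 1) :: rest) v p = none := by
  rw [runB_succ, if_neg (by omega : ¬(k + 1 = 0)), if_pos (by omega : k + 1 ≤ 4)]
  simp only [Nat.add_sub_cancel, hdd]
  rw [if_pos hg, hc]

theorem runB_dir_zero (G : Nat) (x y s : Int) (k : Nat) (hk : k ≤ 3)
    (rest : List (Int × Int × Int × Nat)) (v : List (List Bool)) (p : List (Int × Int))
    (dx dy : Int) (hdd : dirs.getD k (0, 0) = (dx, dy))
    (hg : 0 ≤ x + dx ∧ x + dx < 9 ∧ 0 ≤ y + dy ∧ y + dy < 9) (c : Cell)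
    (hc : getCell? (x + dx) (y + dy) = some c) (hz : ¬ c ≠ Cell.num 0) :
    runB (G + 1) ((x, y, s, k + 1) :: rest) v p = runB G ((x, y, s, k + 1 + 1) :: rest) v p := by
  rw [runB_succ, if_neg (by omega : ¬(k + 1 = 0)), if_pos (by omega : k + 1 ≤ 4)]
  simp only [Nat.add_sub_cancel, hdd]
  rw [if_pos hg, hc]
  simp only []
  rw [if_neg hz]

theorem runB_dir_vis_none (G : Nat) (x y s : Int) (k : Nat) (hk : k ≤ 3)
    (rest : List (Int × Int × Int × Nat)) (v : List (List Bool)) (p : List (Int × Int))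
    (dx dy : Int) (hdd : dirs.getD k (0, 0) = (dx, dy))
    (hg : 0 ≤ x + dx ∧ x + dx < 9 ∧ 0 ≤ y + dy ∧ y + dy < 9) (c : Cell)
    (hc : getCell? (x + dx) (y + dy) = some c) (hz : c ≠ Cell.num 0)
    (hv : getVis? v (x + dx) (y + dy) = none) :
    runB (G + 1) ((x, y, s, k + 1) :: rest) v p = none := by
  rw [runB_succ, if_neg (by omega : ¬(k + 1 = 0)), if_pos (by omega : k + 1 ≤ 4)]
  simp only [Nat.add_sub_cancel, hdd]
  rw [if_pos hg, hc]
  simp only []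
  rw [if_pos hz, hv]

theorem runB_dir_vis (G : Nat) (x y s : Int) (k : Nat) (hk : k ≤ 3)
    (rest : List (Int × Int × Int × Nat)) (v : List (List Bool)) (p : List (Int × Int))
    (dx dy : Int) (hdd : dirs.getD k (0, 0) = (dx, dy))
    (hg : 0 ≤ x + dx ∧ x + dx < 9 ∧ 0 ≤ y + dy ∧ y + dy < 9) (c : Cell)
    (hc : getCell? (x + dx) (y + dy) = some c) (hz : c ≠ Cell.num 0) (b0 : Bool)
    (hv : getVis? v (x + dx) (y + dy) = some b0) :
    runB (G + 1) ((x, y, s, k + 1) :: rest) v p =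
      if b0 = false then
        runB G ((x + dx, y + dy, s + valorCelda c, 0) :: (x, y, s, k + 1 + 1) :: rest) v p
      else runB G ((x, y, s, k + 1 + 1) :: rest) v p := by
  rw [runB_succ, if_neg (by omega : ¬(k + 1 = 0)), if_pos (by omega : k + 1 ≤ 4)]
  simp only [Nat.add_sub_cancel, hdd]
  rw [if_pos hg, hc]
  simp only []
  rw [if_pos hz, hv]

theorem runB_unwind_some (G : Nat) (x y s : Int) (i : Nat) (hi0 : ¬ i = 0) (hi4 : ¬ i ≤ 4)
    (rest : List (Int × Int × Int × Nat)) (v w : List (List Bool)) (p : List (Int × Int))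
    (hv : setVis? v x y false = some w) :
    runB (G + 1) ((x, y, s, i) :: rest) v p = runB G rest w p.dropLast := by
  rw [runB_succ, if_neg hi0, if_neg hi4, hv]

theorem runB_unwind_none (G : Nat) (x y s : Int) (i : Nat) (hi0 : ¬ i = 0) (hi4 : ¬ i ≤ 4)
    (rest : List (Int × Int × Int × Nat)) (v : List (List Bool)) (p : List (Int × Int))
    (hv : setVis? v x y false = none) :
    runB (G + 1) ((x, y, s, i) :: rest) v p = none := by
  rw [runB_succ, if_neg hi0, if_neg hi4, hv]

-- ---- simulation: B's stack machine reproduces A's recursion ----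

def SimGoStmt (f : Nat) : Prop := ∀ x y s v p (rest : List (Int × Int × Int × Nat)),
  (∀ v' p', goA f x y s v p = some (true, v', p') →
    ∀ G, 4 ^ (f + 2) - 2 ≤ G → runB G ((x, y, s, 0) :: rest) v p = some (true, v', p')) ∧
  (∀ v' p', goA f x y s v p = some (false, v', p') →
    ∀ g r, runB g rest v' p' = some r → ∀ G, 4 ^ (f + 2) - 2 + g ≤ G →
      runB G ((x, y, s, 0) :: rest) v p = some r) ∧
  (∀ v' p', goA f x y s v p = some (false, v', p') →
    (∀ g, runB g rest v' p' = none) → ∀ G, runB G ((x, y, s, 0) :: rest) v p = none) ∧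
  (goA f x y s v p = none → mfalse' ((setVis? v x y true).getD v) + 2 ≤ f →
    ∀ G, runB G ((x, y, s, 0) :: rest) v p = none)

def SimLoopStmt (f k : Nat) : Prop := ∀ x y s v p (rest : List (Int × Int × Int × Nat)),
  (∀ v' p', loopA f x y s v p (dirs.drop k) = some (true, v', p') →
    ∀ G, (4 - k) * (4 ^ (f + 2) - 1) + 1 ≤ G →
      runB G ((x, y, s, k + 1) :: rest) v p = some (true, v', p')) ∧
  (∀ v' p', loopA f x y s v p (dirs.drop k) = some (false, v', p') →
    ∀ g r, runB g rest v' p' = some r → ∀ G, (4 - k) * (4 ^ (f + 2) - 1) + 1 + g ≤ G →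
      runB G ((x, y, s, k + 1) :: rest) v p = some r) ∧
  (∀ v' p', loopA f x y s v p (dirs.drop k) = some (false, v', p') →
    (∀ g, runB g rest v' p' = none) → ∀ G, runB G ((x, y, s, k + 1) :: rest) v p = none) ∧
  (loopA f x y s v p (dirs.drop k) = none → mfalse' v + 1 ≤ f →
    ∀ G, runB G ((x, y, s, k + 1) :: rest) v p = none)

theorem simL_unwind (f k : Nat) (hk : 4 ≤ k) : SimLoopStmt f k := by
  intro x y s v p rest
  have hds : dirs.drop k = ([] : List (Int × Int)) := List.drop_of_length_le (by simp [dirs]; omega)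
  have hi0 : ¬ (k + 1 = 0) := by omega
  have hi4 : ¬ (k + 1 ≤ 4) := by omega
  refine ⟨?_, ?_, ?_, ?_⟩
  · intro v' p' hA G hG
    rw [hds, loopA_nil] at hA
    cases hv : setVis? v x y false with
    | none => rw [hv] at hA; exact absurd hA (by simp)
    | some w => rw [hv] at hA; simp at hA
  · intro v' p' hA g r hr G hG
    rw [hds, loopA_nil] at hA
    cases hv : setVis? v x y false with
    | none => rw [hv] at hA; exact absurd hA (by simp)
    | some w =>
      rw [hv] at hA
      simp only [Option.some.injEq, Prod.mk.injEq, true_and] at hA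
      obtain ⟨rfl, rfl⟩ := hA
      have h40 : 4 - k = 0 := by omega
      rw [h40, zero_mul] at hG
      cases G with
      | zero => omega
      | succ G' =>
        rw [runB_unwind_some G' x y s (k + 1) hi0 hi4 rest v w p hv]
        exact runB_mono_le g G' (by omega) _ _ _ _ hr
  · intro v' p' hA hnone G
    rw [hds, loopA_nil] at hA
    cases hv : setVis? v x y false with
    | none => rw [hv] at hA; exact absurd hA (by simp)
    | some w =>
      rw [hv] at hA
      simp only [Option.some.injEq, Prod.mk.injEq, true_and] at hA
      obtain ⟨rfl, rfl⟩ := hA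
      cases G with
      | zero => exact runB_zero _ _ _
      | succ G' =>
        rw [runB_unwind_some G' x y s (k + 1) hi0 hi4 rest v w p hv]
        exact hnone G'
  · intro hA _ G
    rw [hds, loopA_nil] at hA
    cases hv : setVis? v x y false with
    | none =>
      cases G with
      | zero => exact runB_zero _ _ _
      | succ G' => exact runB_unwind_none G' x y s (k + 1) hi0 hi4 rest v p hv
    | some w => rw [hv] at hA; exact absurd hA (by simp)

theorem simL_step (f k : Nat) (hk : k ≤ 3) (hgo : SimGoStmt f) (ihL : SimLoopStmt f (k + 1)) :
    SimLoopStmt f k := by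
  have hlt : k < dirs.length := by simp [dirs]; omega
  have hds0 : dirs.drop k = dirs[k] :: dirs.drop (k + 1) := List.drop_eq_getElem_cons hlt
  rcases hdk : dirs[k] with ⟨dx, dy⟩
  rw [hdk] at hds0
  have hdd : dirs.getD k (0, 0) = (dx, dy) := by rw [List.getD_eq_getElem dirs _ hlt, hdk]
  have hC2 : (2 : ℕ) ≤ 4 ^ (f + 2) := by
    calc (2 : ℕ) ≤ 4 ^ 2 := by norm_num
    _ ≤ 4 ^ (f + 2) := Nat.pow_le_pow_right (by norm_num) (by omega)
  have hsplit : (4 - k) * (4 ^ (f + 2) - 1) = (3 - k) * (4 ^ (f + 2) - 1) + (4 ^ (f + 2) - 1) := by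
    rw [show 4 - k = (3 - k) + 1 by omega, add_mul, one_mul]
  have h34 : 4 - (k + 1) = 3 - k := by omega
  intro x y s v p rest
  refine ⟨?_, ?_, ?_, ?_⟩
  -- part 1: A's loop returns true
  · intro v' p' hA G hG
    rw [hds0, loopA_cons] at hA
    by_cases hg : 0 ≤ x + dx ∧ x + dx < 9 ∧ 0 ≤ y + dy ∧ y + dy < 9
    · rw [if_pos hg] at hA
      cases hc : getCell? (x + dx) (y + dy) with
      | none => rw [hc] at hA; simp only [] at hA; exact absurd hA (by simp)
      | some c =>
        rw [hc] at hA
        simp only [] at hA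
        by_cases hz : c ≠ Cell.num 0
        · rw [if_pos hz] at hA
          cases hv : getVis? v (x + dx) (y + dy) with
          | none => rw [hv] at hA; simp only [] at hA; exact absurd hA (by simp)
          | some b0 =>
            rw [hv] at hA
            simp only [] at hA
            by_cases hb0 : b0 = false
            · rw [if_pos hb0] at hA
              subst hb0
              cases hch : goA f (x + dx) (y + dy) (s + valorCelda c) v p with
              | none => rw [hch] at hA; simp only [] at hA; exact absurd hA (by simp)
              | some res =>
                obtain ⟨bc, vc, pc⟩ := res
                rw [hch] at hA
                cases bc with
                | true =>
                  simp only [] at hA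
                  simp only [Option.some.injEq, Prod.mk.injEq, true_and] at hA
                  obtain ⟨rfl, rfl⟩ := hA
                  cases G with
                  | zero => rw [hsplit] at hG; set B := (3 - k) * (4 ^ (f + 2) - 1) with hB; omega
                  | succ G' =>
                    rw [runB_dir_vis G' x y s k hk rest v p dx dy hdd hg c hc hz false hv,
                      if_pos rfl]
                    refine (hgo _ _ _ _ _ _).1 _ _ hch G' ?_
                    rw [hsplit] at hG
                    set B := (3 - k) * (4 ^ (f + 2) - 1) with hB
                    omega
                | false =>
                  simp only [] at hA
                  obtain ⟨hpc, hvc⟩ := restG f _ _ _ _ _ _ _ hch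
                  have hvcv : vc = v := by
                    rcases hvc with ⟨_, rfl⟩ | hset
                    · rfl
                    · rw [setVis?_false_self v _ _ hv] at hset
                      simpa [eq_comm] using hset
                  rw [hvcv, hpc] at hA hch
                  cases G with
                  | zero => rw [hsplit] at hG; set B := (3 - k) * (4 ^ (f + 2) - 1) with hB; omega
                  | succ G' =>
                    rw [runB_dir_vis G' x y s k hk rest v p dx dy hdd hg c hc hz false hv,
                      if_pos rfl]
                    refine (hgo _ _ _ _ _ _).2.1 v p hch ((4 - (k + 1)) * (4 ^ (f + 2) - 1) + 1)
                      (true, v', p') ((ihL x y s v p rest).1 v' p' hA _ (le_refl _)) G' ?_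
                    rw [h34]
                    rw [hsplit] at hG
                    set B := (3 - k) * (4 ^ (f + 2) - 1) with hB
                    omega
            · rw [if_neg hb0] at hA
              cases G with
              | zero => rw [hsplit] at hG; set B := (3 - k) * (4 ^ (f + 2) - 1) with hB; omega
              | succ G' =>
                rw [runB_dir_vis G' x y s k hk rest v p dx dy hdd hg c hc hz b0 hv, if_neg hb0]
                refine (ihL x y s v p rest).1 v' p' hA G' ?_
                rw [h34]
                rw [hsplit] at hG
                set B := (3 - k) * (4 ^ (f + 2) - 1) with hB
                omega
        · rw [if_neg hz] at hA
          cases G with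
          | zero => rw [hsplit] at hG; set B := (3 - k) * (4 ^ (f + 2) - 1) with hB; omega
          | succ G' =>
            rw [runB_dir_zero G' x y s k hk rest v p dx dy hdd hg c hc hz]
            refine (ihL x y s v p rest).1 v' p' hA G' ?_
            rw [h34]
            rw [hsplit] at hG
            set B := (3 - k) * (4 ^ (f + 2) - 1) with hB
            omega
    · rw [if_neg hg] at hA
      cases G with
      | zero => rw [hsplit] at hG; set B := (3 - k) * (4 ^ (f + 2) - 1) with hB; omega
      | succ G' =>
        rw [runB_dir_bounds_out G' x y s k hk rest v p dx dy hdd hg]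
        refine (ihL x y s v p rest).1 v' p' hA G' ?_
        rw [h34]
        rw [hsplit] at hG
        set B := (3 - k) * (4 ^ (f + 2) - 1) with hB
        omega
  -- part 2: A's loop returns false, B's continuation returns
  · intro v' p' hA g r hr G hG
    rw [hds0, loopA_cons] at hA
    by_cases hg : 0 ≤ x + dx ∧ x + dx < 9 ∧ 0 ≤ y + dy ∧ y + dy < 9
    · rw [if_pos hg] at hA
      cases hc : getCell? (x + dx) (y + dy) with
      | none => rw [hc] at hA; simp only [] at hA; exact absurd hA (by simp)
      | some c =>
        rw [hc] at hA
        simp only [] at hA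
        by_cases hz : c ≠ Cell.num 0
        · rw [if_pos hz] at hA
          cases hv : getVis? v (x + dx) (y + dy) with
          | none => rw [hv] at hA; simp only [] at hA; exact absurd hA (by simp)
          | some b0 =>
            rw [hv] at hA
            simp only [] at hA
            by_cases hb0 : b0 = false
            · rw [if_pos hb0] at hA
              subst hb0
              cases hch : goA f (x + dx) (y + dy) (s + valorCelda c) v p with
              | none => rw [hch] at hA; simp only [] at hA; exact absurd hA (by simp)
              | some res =>
                obtain ⟨bc, vc, pc⟩ := res
                rw [hch] at hA
                cases bc with
                | true => simp only [] at hA; simp at hA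
                | false =>
                  simp only [] at hA
                  obtain ⟨hpc, hvc⟩ := restG f _ _ _ _ _ _ _ hch
                  have hvcv : vc = v := by
                    rcases hvc with ⟨_, rfl⟩ | hset
                    · rfl
                    · rw [setVis?_false_self v _ _ hv] at hset
                      simpa [eq_comm] using hset
                  rw [hvcv, hpc] at hA hch
                  cases G with
                  | zero => rw [hsplit] at hG; set B := (3 - k) * (4 ^ (f + 2) - 1) with hB; omega
                  | succ G' =>
                    rw [runB_dir_vis G' x y s k hk rest v p dx dy hdd hg c hc hz false hv,
                      if_pos rfl]
                    refine (hgo _ _ _ _ _ _).2.1 v p hch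
                      ((4 - (k + 1)) * (4 ^ (f + 2) - 1) + 1 + g) r
                      ((ihL x y s v p rest).2.1 v' p' hA g r hr _ (le_refl _)) G' ?_
                    rw [h34]
                    rw [hsplit] at hG
                    set B := (3 - k) * (4 ^ (f + 2) - 1) with hB
                    omega
            · rw [if_neg hb0] at hA
              cases G with
              | zero => rw [hsplit] at hG; set B := (3 - k) * (4 ^ (f + 2) - 1) with hB; omega
              | succ G' =>
                rw [runB_dir_vis G' x y s k hk rest v p dx dy hdd hg c hc hz b0 hv, if_neg hb0]
                refine (ihL x y s v p rest).2.1 v' p' hA g r hr G' ?_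
                rw [h34]
                rw [hsplit] at hG
                set B := (3 - k) * (4 ^ (f + 2) - 1) with hB
                omega
        · rw [if_neg hz] at hA
          cases G with
          | zero => rw [hsplit] at hG; set B := (3 - k) * (4 ^ (f + 2) - 1) with hB; omega
          | succ G' =>
            rw [runB_dir_zero G' x y s k hk rest v p dx dy hdd hg c hc hz]
            refine (ihL x y s v p rest).2.1 v' p' hA g r hr G' ?_
            rw [h34]
            rw [hsplit] at hG
            set B := (3 - k) * (4 ^ (f + 2) - 1) with hB
            omega
    · rw [if_neg hg] at hA
      cases G with
      | zero => rw [hsplit] at hG; set B := (3 - k) * (4 ^ (f + 2) - 1) with hB; omega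
      | succ G' =>
        rw [runB_dir_bounds_out G' x y s k hk rest v p dx dy hdd hg]
        refine (ihL x y s v p rest).2.1 v' p' hA g r hr G' ?_
        rw [h34]
        rw [hsplit] at hG
        set B := (3 - k) * (4 ^ (f + 2) - 1) with hB
        omega
  -- part 3: A's loop returns false, B's continuation runs out of range
  · intro v' p' hA hnone G
    rw [hds0, loopA_cons] at hA
    by_cases hg : 0 ≤ x + dx ∧ x + dx < 9 ∧ 0 ≤ y + dy ∧ y + dy < 9
    · rw [if_pos hg] at hA
      cases hc : getCell? (x + dx) (y + dy) with
      | none => rw [hc] at hA; simp only [] at hA; exact absurd hA (by simp)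
      | some c =>
        rw [hc] at hA
        simp only [] at hA
        by_cases hz : c ≠ Cell.num 0
        · rw [if_pos hz] at hA
          cases hv : getVis? v (x + dx) (y + dy) with
          | none => rw [hv] at hA; simp only [] at hA; exact absurd hA (by simp)
          | some b0 =>
            rw [hv] at hA
            simp only [] at hA
            by_cases hb0 : b0 = false
            · rw [if_pos hb0] at hA
              subst hb0
              cases hch : goA f (x + dx) (y + dy) (s + valorCelda c) v p with
              | none => rw [hch] at hA; simp only [] at hA; exact absurd hA (by simp)
              | some res =>
                obtain ⟨bc, vc, pc⟩ := res
                rw [hch] at hA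
                cases bc with
                | true => simp only [] at hA; simp at hA
                | false =>
                  simp only [] at hA
                  obtain ⟨hpc, hvc⟩ := restG f _ _ _ _ _ _ _ hch
                  have hvcv : vc = v := by
                    rcases hvc with ⟨_, rfl⟩ | hset
                    · rfl
                    · rw [setVis?_false_self v _ _ hv] at hset
                      simpa [eq_comm] using hset
                  rw [hvcv, hpc] at hA hch
                  cases G with
                  | zero => exact runB_zero _ _ _
                  | succ G' =>
                    rw [runB_dir_vis G' x y s k hk rest v p dx dy hdd hg c hc hz false hv,
                      if_pos rfl]
                    exact (hgo _ _ _ _ _ _).2.2.1 v p hch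
                      ((ihL x y s v p rest).2.2.1 v' p' hA hnone) G'
            · rw [if_neg hb0] at hA
              cases G with
              | zero => exact runB_zero _ _ _
              | succ G' =>
                rw [runB_dir_vis G' x y s k hk rest v p dx dy hdd hg c hc hz b0 hv, if_neg hb0]
                exact (ihL x y s v p rest).2.2.1 v' p' hA hnone G'
        · rw [if_neg hz] at hA
          cases G with
          | zero => exact runB_zero _ _ _
          | succ G' =>
            rw [runB_dir_zero G' x y s k hk rest v p dx dy hdd hg c hc hz]
            exact (ihL x y s v p rest).2.2.1 v' p' hA hnone G'
    · rw [if_neg hg] at hA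
      cases G with
      | zero => exact runB_zero _ _ _
      | succ G' =>
        rw [runB_dir_bounds_out G' x y s k hk rest v p dx dy hdd hg]
        exact (ihL x y s v p rest).2.2.1 v' p' hA hnone G'
  -- part 4: A's loop raises
  · intro hA hm G
    rw [hds0, loopA_cons] at hA
    by_cases hg : 0 ≤ x + dx ∧ x + dx < 9 ∧ 0 ≤ y + dy ∧ y + dy < 9
    · rw [if_pos hg] at hA
      cases hc : getCell? (x + dx) (y + dy) with
      | none =>
        cases G with
        | zero => exact runB_zero _ _ _
        | succ G' => exact runB_dir_cell_none G' x y s k hk rest v p dx dy hdd hg hc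
      | some c =>
        rw [hc] at hA
        simp only [] at hA
        by_cases hz : c ≠ Cell.num 0
        · rw [if_pos hz] at hA
          cases hv : getVis? v (x + dx) (y + dy) with
          | none =>
            cases G with
            | zero => exact runB_zero _ _ _
            | succ G' => exact runB_dir_vis_none G' x y s k hk rest v p dx dy hdd hg c hc hz hv
          | some b0 =>
            rw [hv] at hA
            simp only [] at hA
            by_cases hb0 : b0 = false
            · rw [if_pos hb0] at hA
              subst hb0
              cases hch : goA f (x + dx) (y + dy) (s + valorCelda c) v p with
              | none =>
                have hm' : mfalse' ((setVis? v (x + dx) (y + dy) true).getD v) + 2 ≤ f := by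
                  obtain ⟨w, hw⟩ := setVis?_true_of_get v (x + dx) (y + dy) false hv
                  have hdec := mfalse'_setVis?_true v w (x + dx) (y + dy) hv hw
                  rw [hw]
                  simp only [Option.getD_some]
                  omega
                cases G with
                | zero => exact runB_zero _ _ _
                | succ G' =>
                  rw [runB_dir_vis G' x y s k hk rest v p dx dy hdd hg c hc hz false hv,
                    if_pos rfl]
                  exact (hgo _ _ _ _ _ _).2.2.2 hch hm' G'
              | some res =>
                obtain ⟨bc, vc, pc⟩ := res
                rw [hch] at hA
                cases bc with
                | true => simp only [] at hA; simp at hA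
                | false =>
                  simp only [] at hA
                  obtain ⟨hpc, hvc⟩ := restG f _ _ _ _ _ _ _ hch
                  have hvcv : vc = v := by
                    rcases hvc with ⟨_, rfl⟩ | hset
                    · rfl
                    · rw [setVis?_false_self v _ _ hv] at hset
                      simpa [eq_comm] using hset
                  rw [hvcv, hpc] at hA hch
                  cases G with
                  | zero => exact runB_zero _ _ _
                  | succ G' =>
                    rw [runB_dir_vis G' x y s k hk rest v p dx dy hdd hg c hc hz false hv,
                      if_pos rfl]
                    exact (hgo _ _ _ _ _ _).2.2.1 v p hch
                      ((ihL x y s v p rest).2.2.2 hA hm) G'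
            · rw [if_neg hb0] at hA
              cases G with
              | zero => exact runB_zero _ _ _
              | succ G' =>
                rw [runB_dir_vis G' x y s k hk rest v p dx dy hdd hg c hc hz b0 hv, if_neg hb0]
                exact (ihL x y s v p rest).2.2.2 hA hm G'
        · rw [if_neg hz] at hA
          cases G with
          | zero => exact runB_zero _ _ _
          | succ G' =>
            rw [runB_dir_zero G' x y s k hk rest v p dx dy hdd hg c hc hz]
            exact (ihL x y s v p rest).2.2.2 hA hm G'
    · rw [if_neg hg] at hA
      cases G with
      | zero => exact runB_zero _ _ _
      | succ G' =>
        rw [runB_dir_bounds_out G' x y s k hk rest v p dx dy hdd hg]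
        exact (ihL x y s v p rest).2.2.2 hA hm G'

theorem simGo : ∀ f, SimGoStmt f := by
  intro f
  induction f with
  | zero =>
    intro x y s v p rest
    refine ⟨?_, ?_, ?_, ?_⟩
    · intro v' p' hA; rw [goA_zero] at hA; exact absurd hA (by simp)
    · intro v' p' hA; rw [goA_zero] at hA; exact absurd hA (by simp)
    · intro v' p' hA; rw [goA_zero] at hA; exact absurd hA (by simp)
    · intro _ hm; omega
  | succ f ih =>
    have hL0 : SimLoopStmt f 0 :=
      simL_step f 0 (by omega) ih (simL_step f 1 (by omega) ih (simL_step f 2 (by omega) ih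
        (simL_step f 3 (by omega) ih (simL_unwind f 4 (by omega)))))
    have hC2 : (2 : ℕ) ≤ 4 ^ (f + 2) := by
      calc (2 : ℕ) ≤ 4 ^ 2 := by norm_num
      _ ≤ 4 ^ (f + 2) := Nat.pow_le_pow_right (by norm_num) (by omega)
    have hpow : (4 : ℕ) ^ (f + 1 + 2) = 4 * 4 ^ (f + 2) := by ring
    intro x y s v p rest
    refine ⟨?_, ?_, ?_, ?_⟩
    -- part 1: goA returns true
    · intro v' p' hA G hG
      rw [goA_succ] at hA
      cases hc : getCell? x y with
      | none => rw [hc] at hA; simp only [] at hA; exact absurd hA (by simp)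
      | some c =>
        rw [hc] at hA
        simp only [] at hA
        by_cases hF : c = Cell.F
        · rw [if_pos hF] at hA
          by_cases hs : 23 ≤ s
          · rw [if_pos hs] at hA
            simp only [Option.some.injEq, Prod.mk.injEq, true_and] at hA
            obtain ⟨rfl, rfl⟩ := hA
            cases G with
            | zero => rw [hpow] at hG; omega
            | succ G' =>
              subst hF
              rw [runB_entry_F G' x y s rest v p hc, if_pos hs]
          · rw [if_neg hs] at hA
            exact absurd hA (by simp)
        · rw [if_neg hF] at hA
          cases hv : setVis? v x y true with
          | none => rw [hv] at hA; simp only [] at hA; exact absurd hA (by simp)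
          | some v1 =>
            rw [hv] at hA
            simp only [] at hA
            rw [show dirs = dirs.drop 0 from (List.drop_zero (l := dirs)).symm] at hA
            cases G with
            | zero => rw [hpow] at hG; omega
            | succ G' =>
              rw [runB_entry_enter G' x y s rest v v1 p c hc hF hv]
              refine (hL0 x y s v1 (p ++ [(x, y)]) rest).1 v' p' hA G' ?_
              rw [hpow] at hG
              omega
    -- part 2: goA returns false, continuation returns
    · intro v' p' hA g r hr G hG
      rw [goA_succ] at hA
      cases hc : getCell? x y with
      | none => rw [hc] at hA; simp only [] at hA; exact absurd hA (by simp)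
      | some c =>
        rw [hc] at hA
        simp only [] at hA
        by_cases hF : c = Cell.F
        · rw [if_pos hF] at hA
          by_cases hs : 23 ≤ s
          · rw [if_pos hs] at hA; exact absurd hA (by simp)
          · rw [if_neg hs] at hA
            simp only [Option.some.injEq, Prod.mk.injEq, true_and] at hA
            obtain ⟨rfl, rfl⟩ := hA
            cases G with
            | zero => rw [hpow] at hG; omega
            | succ G' =>
              subst hF
              rw [runB_entry_F G' x y s rest v p hc, if_neg hs]
              exact runB_mono_le g G' (by rw [hpow] at hG; omega) _ _ _ _ hr
        · rw [if_neg hF] at hA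
          cases hv : setVis? v x y true with
          | none => rw [hv] at hA; simp only [] at hA; exact absurd hA (by simp)
          | some v1 =>
            rw [hv] at hA
            simp only [] at hA
            rw [show dirs = dirs.drop 0 from (List.drop_zero (l := dirs)).symm] at hA
            cases G with
            | zero => rw [hpow] at hG; omega
            | succ G' =>
              rw [runB_entry_enter G' x y s rest v v1 p c hc hF hv]
              refine (hL0 x y s v1 (p ++ [(x, y)]) rest).2.1 v' p' hA g r hr G' ?_
              rw [hpow] at hG
              omega
    -- part 3: goA returns false, continuation runs out of range
    · intro v' p' hA hnone G
      rw [goA_succ] at hA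
      cases hc : getCell? x y with
      | none => rw [hc] at hA; simp only [] at hA; exact absurd hA (by simp)
      | some c =>
        rw [hc] at hA
        simp only [] at hA
        by_cases hF : c = Cell.F
        · rw [if_pos hF] at hA
          by_cases hs : 23 ≤ s
          · rw [if_pos hs] at hA; exact absurd hA (by simp)
          · rw [if_neg hs] at hA
            simp only [Option.some.injEq, Prod.mk.injEq, true_and] at hA
            obtain ⟨rfl, rfl⟩ := hA
            cases G with
            | zero => exact runB_zero _ _ _
            | succ G' =>
              subst hF
              rw [runB_entry_F G' x y s rest v p hc, if_neg hs]
              exact hnone G'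
        · rw [if_neg hF] at hA
          cases hv : setVis? v x y true with
          | none => rw [hv] at hA; simp only [] at hA; exact absurd hA (by simp)
          | some v1 =>
            rw [hv] at hA
            simp only [] at hA
            rw [show dirs = dirs.drop 0 from (List.drop_zero (l := dirs)).symm] at hA
            cases G with
            | zero => exact runB_zero _ _ _
            | succ G' =>
              rw [runB_entry_enter G' x y s rest v v1 p c hc hF hv]
              exact (hL0 x y s v1 (p ++ [(x, y)]) rest).2.2.1 v' p' hA hnone G'
    -- part 4: goA raises
    · intro hA hm G
      rw [goA_succ] at hA
      cases hc : getCell? x y with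
      | none =>
        cases G with
        | zero => exact runB_zero _ _ _
        | succ G' => exact runB_entry_cell_none G' x y s rest v p hc
      | some c =>
        rw [hc] at hA
        simp only [] at hA
        by_cases hF : c = Cell.F
        · rw [if_pos hF] at hA
          by_cases hs : 23 ≤ s
          · rw [if_pos hs] at hA; exact absurd hA (by simp)
          · rw [if_neg hs] at hA; exact absurd hA (by simp)
        · rw [if_neg hF] at hA
          cases hv : setVis? v x y true with
          | none =>
            cases G with
            | zero => exact runB_zero _ _ _
            | succ G' => exact runB_entry_set_none G' x y s rest v p c hc hF hv
          | some v1 =>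
            rw [hv] at hA
            simp only [] at hA
            rw [show dirs = dirs.drop 0 from (List.drop_zero (l := dirs)).symm] at hA
            cases G with
            | zero => exact runB_zero _ _ _
            | succ G' =>
              rw [runB_entry_enter G' x y s rest v v1 p c hc hF hv]
              refine (hL0 x y s v1 (p ++ [(x, y)]) rest).2.2.2 hA ?_ G'
              rw [hv] at hm
              simp only [Option.getD_some] at hm
              omega

-- the two ports agree on every input: both model an IndexError run as `false`
theorem ports_agree (x y suma : Int) (v : List (List Bool)) (p : List (Int × Int)) :
    backtrack x y suma v p = backtrack_alt x y suma v p := by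
  unfold backtrack backtrack_alt
  have hC2 : (2 : ℕ) ≤ 4 ^ (gridSize v + 2 + 2) := by
    calc (2 : ℕ) ≤ 4 ^ 2 := by norm_num
    _ ≤ 4 ^ (gridSize v + 2 + 2) := Nat.pow_le_pow_right (by norm_num) (by omega)
  have hpow : (4 : ℕ) ^ (gridSize v + 4) = 4 ^ (gridSize v + 2 + 2) := by ring_nf
  cases hA : goA (gridSize v + 2) x y suma v p with
  | none =>
    have hm : mfalse' ((setVis? v x y true).getD v) + 2 ≤ gridSize v + 2 := by
      have := mAfter_le v x y
      omega
    have := (simGo (gridSize v + 2) x y suma v p []).2.2.2 hA hm (4 ^ (gridSize v + 4))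
    rw [this]
  | some res =>
    obtain ⟨b, v', p'⟩ := res
    cases b with
    | true =>
      have := (simGo (gridSize v + 2) x y suma v p []).1 v' p' hA (4 ^ (gridSize v + 4))
        (by rw [hpow]; exact Nat.sub_le _ _)
      rw [this]
    | false =>
      have h1 : runB 1 ([] : List (Int × Int × Int × Nat)) v' p' = some (false, v', p') :=
        runB_nil 0 v' p'
      have := (simGo (gridSize v + 2) x y suma v p []).2.1 v' p' hA 1 (false, v', p') h1
        (4 ^ (gridSize v + 4)) (by rw [hpow]; omega)
      rw [this]

-- ===== VERDICT (by name: the statement is the Claim_ definition above) =====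
theorem backtrack_spec : Claim_equal_backtrack := by
  intro x y suma visitados path _ _
  unfold Spec_backtrack
  exact ports_agree x y suma visitados path
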